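-- pv_equiv track=rewrite | github.com/PEC-CSS/Graveyard2025 | DragonBlessedNumbers.py | count_dragon_blessed
-- ===== SOURCE A (Python) =====
-- from functools import lru_cache
--
-- def count_dragon_blessed(X):
--     """
--     Count numbers in [0, X] that are Dragon-Blessed.
--     (0 is counted as Dragon-Blessed as a single-digit number.)
--     """
--     s = str(X)
--     n = len(s)
--
--     @lru_cache(maxsize=None)
--     def dp(pos, tight, started, first_digit):
--         """
--         pos: current index (0-indexed) in s
--         tight: True if current prefix is exactly equal to s's prefix; else False
--         started: True if we've placed a nonzero digit (i.e., the number has started)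
--         first_digit: the first nonzero digit (if started), or -1 if not started
--         """
--         # Base case: if we've processed all positions:
--         if pos == n:
--             # If we never started, that means the number is 0 (which is valid).
--             return 1
--
--         res = 0
--         max_digit = int(s[pos]) if tight else 9
--
--         for d in range(0, max_digit + 1):
--             new_tight = tight and (d == max_digit)
--             if not started:
--                 # Still in the leading zeros
--                 if d == 0:
--                     # Continue without starting
--                     res += dp(pos + 1, new_tight, False, -1)
--                 else:
--                     # Start the number with d
--                     res += dp(pos + 1, new_tight, True, d)
--             else:
--                 # Already started: enforce that the chosen digit is < first_digit
--                 if d < first_digit: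
--                     res += dp(pos + 1, new_tight, True, first_digit)
--                 # If d >= first_digit, skip this branch (invalid Dragon-Blessed)
--         return res
--
--     return dp(0, True, False, -1)
-- ===== SOURCE B (Python) =====
-- def count_dragon_blessed(X):
--     """
--     Count numbers in [0, X] that are Dragon-Blessed, by direct combinatorial
--     counting over the digits of X instead of a memoized digit DP.
--     """
--     s = str(X)
--     digits = [int(c) for c in s]
--     n = len(digits)
--     total = 1  # zero itself is dragon-blessed
--     # all dragon-blessed numbers with fewer digits than X
--     for L in range(1, n):
--         for f in range(1, 10):
--             total += f ** (L - 1)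
--     # tight left-to-right walk along the digits of X
--     started = False
--     first = 0
--     for i in range(n):
--         d = digits[i]
--         rem = n - 1 - i
--         if not started:
--             for f in range(1, d):
--                 total += f ** rem
--             if d > 0:
--                 started = True
--                 first = d
--         else:
--             total += min(d, first) * first ** rem
--             if d >= first:
--                 return total
--     if started:
--         total += 1  # X itself is dragon-blessed
--     return total
-- ===== Notes on version B (the rewrite author's own statement) =====
-- stated objective: alternative
-- what changed: Replaced the memoized recursive digit DP (per-state branching over all candidate digits) by direct combinatorial counting: closed power sums for all strictly shorter lengths plus a single tight left-to-right walk over the digits of X.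
import Mathlib
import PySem

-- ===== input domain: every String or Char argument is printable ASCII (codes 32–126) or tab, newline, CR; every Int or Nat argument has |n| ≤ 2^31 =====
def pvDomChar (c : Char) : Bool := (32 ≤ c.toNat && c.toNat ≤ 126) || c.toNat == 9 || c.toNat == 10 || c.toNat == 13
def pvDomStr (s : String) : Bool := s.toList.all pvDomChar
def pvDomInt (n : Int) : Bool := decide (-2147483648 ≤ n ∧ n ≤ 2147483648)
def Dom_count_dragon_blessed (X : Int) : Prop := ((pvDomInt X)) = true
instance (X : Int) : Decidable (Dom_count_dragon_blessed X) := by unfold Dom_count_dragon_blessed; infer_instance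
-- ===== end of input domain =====

-- B replaces A's memoized digit DP by direct combinatorial counting over the digits of X:
-- closed sums for the strictly shorter lengths plus one tight left-to-right walk.

-- int(c) for a digit character; exact on Pre_ (X ≥ 0), where str(X) consists of digits only.
def pvDigit (c : Char) : Int := (c.toNat : Int) - 48

-- ===== PORT A =====
-- dp(pos, tight, started, first_digit), recursing on the remaining digits of str(X).
-- lru_cache is pure memoization (affects speed only), so the port recomputes instead of caching.
def pvDpA : List Int → Bool → Bool → Int → Int
  | [], _, _, _ => 1
  | d :: rest, tight, started, first =>
    let maxd : Int := if tight then d else 9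
    (PySem.List.pyRange 0 (maxd + 1) 1).foldl
      (fun res dd =>
        let newTight := tight && (dd == maxd)
        if !started then
          if dd == 0 then res + pvDpA rest newTight false (-1)
          else res + pvDpA rest newTight true dd
        else
          if dd < first then res + pvDpA rest newTight true first
          else res) 0

def count_dragon_blessed (X : Int) : Int :=
  pvDpA ((PySem.Int.toChars X).map pvDigit) true false (-1)

-- ===== PORT B =====
-- total = 1; for L in range(1, n): for f in range(1, 10): total += f ** (L - 1)
def pvShorter (n : Nat) : Int :=
  (PySem.List.pyRange 1 (n : Int) 1).foldl
    (fun t L => (PySem.List.pyRange 1 10 1).foldl (fun t f => t + f ^ (L - 1).toNat) t) 1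

-- the tight left-to-right walk (Source B's loop with its early return, as a recursion over the digits)
def pvScanB : List Int → Bool → Int → Int → Int
  | [], started, _, total => if started then total + 1 else total
  | d :: rest, started, first, total =>
    if !started then
      let total := (PySem.List.pyRange 1 d 1).foldl (fun t f => t + f ^ rest.length) total
      if 0 < d then pvScanB rest true d total else pvScanB rest false first total
    else
      let total := total + min d first * first ^ rest.length
      if first ≤ d then total else pvScanB rest true first total

def count_dragon_blessed_alt (X : Int) : Int :=
  let digits := (PySem.Int.toChars X).map pvDigit
  pvScanB digits false 0 (pvShorter digits.length)

-- ===== PRECONDITION & SPEC =====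
-- A raises ValueError (int('-') on the sign character of str(X)) for X < 0,
-- so Pre_ admits exactly the nonnegative inputs.
def Pre_count_dragon_blessed (X : Int) : Prop := 0 ≤ X
instance (X : Int) : Decidable (Pre_count_dragon_blessed X) := by unfold Pre_count_dragon_blessed; infer_instance
def pvWitness_count_dragon_blessed : Int := 375

def Spec_count_dragon_blessed (X : Int) (out : Int) : Prop := out = count_dragon_blessed_alt X
instance (X : Int) (out : Int) : Decidable (Spec_count_dragon_blessed X out) := by unfold Spec_count_dragon_blessed; infer_instance

-- ===== CLAIM (what is proved, stated in full; the proofs are below) =====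
def Claim_equal_count_dragon_blessed : Prop := ∀ (X : Int), Dom_count_dragon_blessed X → Pre_count_dragon_blessed X → Spec_count_dragon_blessed X (count_dragon_blessed X)

-- ===== LEMMAS AND PROOFS =====

-- number of dragon-blessed numbers with at most k digits (zero included), proof-side closed form
def pvG : Nat → Int
  | 0 => 1
  | k + 1 => pvG k + (1 ^ k + 2 ^ k + 3 ^ k + 4 ^ k + 5 ^ k + 6 ^ k + 7 ^ k + 8 ^ k + 9 ^ k)

-- non-tight, started with first digit f: every remaining position has exactly f free choices
theorem pvDpA_nontight_started (rest : List Int) : ∀ f : Int, 1 ≤ f → f ≤ 9 →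
    pvDpA rest false true f = f ^ rest.length := by
  induction rest with
  | nil => intro f h1 h9; simp [pvDpA]
  | cons d r ih =>
    intro f h1 h9
    have e : PySem.List.pyRange 0 10 1 = [0,1,2,3,4,5,6,7,8,9] := by decide
    interval_cases f <;>
      simp [pvDpA, e, List.foldl, ih 1 (by norm_num) (by norm_num), ih 2 (by norm_num) (by norm_num),
        ih 3 (by norm_num) (by norm_num), ih 4 (by norm_num) (by norm_num), ih 5 (by norm_num) (by norm_num),
        ih 6 (by norm_num) (by norm_num), ih 7 (by norm_num) (by norm_num), ih 8 (by norm_num) (by norm_num),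
        ih 9 (by norm_num) (by norm_num), pow_succ] <;> ring

-- non-tight, not started: counts all dragon-blessed numbers with at most len digits (zero included)
theorem pvDpA_nontight_unstarted (rest : List Int) :
    pvDpA rest false false (-1) = pvG rest.length := by
  induction rest with
  | nil => simp [pvDpA, pvG]
  | cons d r ih =>
    have e : PySem.List.pyRange 0 10 1 = [0,1,2,3,4,5,6,7,8,9] := by decide
    simp [pvDpA, e, List.foldl, ih, pvG, pvDpA_nontight_started r 1 (by norm_num) (by norm_num), pvDpA_nontight_started r 2 (by norm_num) (by norm_num), pvDpA_nontight_started r 3 (by norm_num) (by norm_num), pvDpA_nontight_started r 4 (by norm_num) (by norm_num), pvDpA_nontight_started r 5 (by norm_num) (by norm_num), pvDpA_nontight_started r 6 (by norm_num) (by norm_num), pvDpA_nontight_started r 7 (by norm_num) (by norm_num), pvDpA_nontight_started r 8 (by norm_num) (by norm_num), pvDpA_nontight_started r 9 (by norm_num) (by norm_num)]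
    ring

-- tight, started with first digit f: A's dp equals B's started scan
set_option maxHeartbeats 1000000 in
theorem pvDpA_tight_started (rest : List Int) : ∀ f : Int, 1 ≤ f → f ≤ 9 →
    (∀ d ∈ rest, 0 ≤ d ∧ d ≤ 9) → ∀ t : Int,
    pvScanB rest true f t = t + pvDpA rest true true f := by
  induction rest with
  | nil => intro f _ _ _ t; simp [pvScanB, pvDpA]
  | cons d r ih =>
    intro f h1 h9 hd t
    have hd0 := (hd d List.mem_cons_self).1
    have hd9 := (hd d List.mem_cons_self).2
    have hr : ∀ x ∈ r, 0 ≤ x ∧ x ≤ 9 := fun x hx => hd x (List.mem_cons_of_mem _ hx)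
    have IH := ih f h1 h9 hr
    have P := pvDpA_nontight_started r f h1 h9
    have e1 : PySem.List.pyRange 0 1 1 = [0] := by decide
    have e2 : PySem.List.pyRange 0 2 1 = [0,1] := by decide
    have e3 : PySem.List.pyRange 0 3 1 = [0,1,2] := by decide
    have e4 : PySem.List.pyRange 0 4 1 = [0,1,2,3] := by decide
    have e5 : PySem.List.pyRange 0 5 1 = [0,1,2,3,4] := by decide
    have e6 : PySem.List.pyRange 0 6 1 = [0,1,2,3,4,5] := by decide
    have e7 : PySem.List.pyRange 0 7 1 = [0,1,2,3,4,5,6] := by decide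
    have e8 : PySem.List.pyRange 0 8 1 = [0,1,2,3,4,5,6,7] := by decide
    have e9 : PySem.List.pyRange 0 9 1 = [0,1,2,3,4,5,6,7,8] := by decide
    have e10 : PySem.List.pyRange 0 10 1 = [0,1,2,3,4,5,6,7,8,9] := by decide
    clear ih hd
    interval_cases f <;> interval_cases d <;>
      simp [pvScanB, pvDpA, List.foldl, IH, P,
        e1, e2, e3, e4, e5, e6, e7, e8, e9, e10] <;> ring

-- B's prelude (count of all strictly shorter dragon-blessed numbers, plus 0) equals pvG
theorem pvShorter_eq_pvG (n : Nat) : pvShorter (n + 1) = pvG n := by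
  induction n with
  | zero => simp [pvShorter, pvG, PySem.List.pyRange]
  | succ k ih =>
    have h : ((k:Int) + 1 + 1) = ((k:Int) + 1) + 1 := by ring
    have e9 : PySem.List.pyRange 1 10 1 = [1,2,3,4,5,6,7,8,9] := by decide
    unfold pvShorter
    push_cast
    rw [h, PySem.List.pyRange_one_succ_right (by omega), List.foldl_append]
    have hk : pvShorter (k+1) = pvG k := ih
    unfold pvShorter at hk
    push_cast at hk
    rw [hk]
    simp [e9, List.foldl, pvG]
    ring

-- the digits of a nonnegative number: all in [0, 9], and a nonzero leading digit unless m = 0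
theorem pvDigits_spec (m : Nat) :
    (∀ d ∈ (Nat.toDigits 10 m).map pvDigit, 0 ≤ d ∧ d ≤ 9) ∧
    (m = 0 → (Nat.toDigits 10 m).map pvDigit = [0]) ∧
    (1 ≤ m → ∃ d0 rest, (Nat.toDigits 10 m).map pvDigit = d0 :: rest ∧ 1 ≤ d0 ∧ d0 ≤ 9) := by
  induction m using Nat.strong_induction_on with
  | _ m ih =>
    refine ⟨?_, ?_, ?_⟩
    · intro d hd
      simp only [List.mem_map] at hd
      obtain ⟨c, hc, rfl⟩ := hd
      have hdig := Nat.isDigit_of_mem_toDigits (by norm_num) (by norm_num) hc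
      simp only [Char.isDigit, Bool.and_eq_true, decide_eq_true_eq] at hdig
      obtain ⟨h1, h2⟩ := hdig
      have b1 : (48 : Nat) ≤ c.val.toNat := UInt32.le_iff_toNat_le.mp h1
      have b2 : c.val.toNat ≤ (57 : Nat) := UInt32.le_iff_toNat_le.mp h2
      unfold pvDigit Char.toNat
      omega
    · rintro rfl; simp [Nat.toDigits_zero]; decide
    · intro hm
      by_cases h10 : m < 10
      · refine ⟨pvDigit (Nat.digitChar m), [], ?_, ?_, ?_⟩
        · rw [Nat.toDigits_of_lt_base h10]; simp
        · interval_cases m <;> decide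
        · interval_cases m <;> decide
      · rw [not_lt] at h10
        rw [Nat.toDigits_of_base_le (by norm_num) h10]
        have hq1 : 1 ≤ m / 10 := Nat.one_le_div_iff (by norm_num) |>.mpr h10
        have hqlt : m / 10 < m := Nat.div_lt_self (by omega) (by norm_num)
        obtain ⟨d0, rest, heq, hlo, hhi⟩ := (ih (m / 10) hqlt).2.2 hq1
        exact ⟨d0, rest ++ [pvDigit (Nat.digitChar (m % 10))], by simp [heq], hlo, hhi⟩

set_option maxHeartbeats 1000000 in
theorem pv_main (X : Int) (hpre : 0 ≤ X) :
    count_dragon_blessed X = count_dragon_blessed_alt X := by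
  unfold count_dragon_blessed count_dragon_blessed_alt
  have hch : PySem.Int.toChars X = Nat.toDigits 10 X.toNat := by
    unfold PySem.Int.toChars; rw [if_neg (by omega)]
  rw [hch]
  obtain ⟨hbounds, hzero, hpos⟩ := pvDigits_spec X.toNat
  by_cases h0 : X.toNat = 0
  · simp only [hzero h0]; decide
  · obtain ⟨d0, rest, heq, hlo, hhi⟩ := hpos (by omega)
    simp only [heq]
    have hrest : ∀ x ∈ rest, 0 ≤ x ∧ x ≤ 9 := fun x hx =>
      hbounds x (by rw [heq]; exact List.mem_cons_of_mem _ hx)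
    have T := pvDpA_tight_started rest d0 hlo hhi hrest
    have G := pvDpA_nontight_unstarted rest
    have S := pvShorter_eq_pvG rest.length
    have P1 := pvDpA_nontight_started rest 1 (by norm_num) (by norm_num)
    have P2 := pvDpA_nontight_started rest 2 (by norm_num) (by norm_num)
    have P3 := pvDpA_nontight_started rest 3 (by norm_num) (by norm_num)
    have P4 := pvDpA_nontight_started rest 4 (by norm_num) (by norm_num)
    have P5 := pvDpA_nontight_started rest 5 (by norm_num) (by norm_num)
    have P6 := pvDpA_nontight_started rest 6 (by norm_num) (by norm_num)
    have P7 := pvDpA_nontight_started rest 7 (by norm_num) (by norm_num)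
    have P8 := pvDpA_nontight_started rest 8 (by norm_num) (by norm_num)
    have e2 : PySem.List.pyRange 0 2 1 = [0,1] := by decide
    have e3 : PySem.List.pyRange 0 3 1 = [0,1,2] := by decide
    have e4 : PySem.List.pyRange 0 4 1 = [0,1,2,3] := by decide
    have e5 : PySem.List.pyRange 0 5 1 = [0,1,2,3,4] := by decide
    have e6 : PySem.List.pyRange 0 6 1 = [0,1,2,3,4,5] := by decide
    have e7 : PySem.List.pyRange 0 7 1 = [0,1,2,3,4,5,6] := by decide
    have e8 : PySem.List.pyRange 0 8 1 = [0,1,2,3,4,5,6,7] := by decide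
    have e9 : PySem.List.pyRange 0 9 1 = [0,1,2,3,4,5,6,7,8] := by decide
    have e10 : PySem.List.pyRange 0 10 1 = [0,1,2,3,4,5,6,7,8,9] := by decide
    have s1 : PySem.List.pyRange 1 1 1 = [] := by decide
    have s2 : PySem.List.pyRange 1 2 1 = [1] := by decide
    have s3 : PySem.List.pyRange 1 3 1 = [1,2] := by decide
    have s4 : PySem.List.pyRange 1 4 1 = [1,2,3] := by decide
    have s5 : PySem.List.pyRange 1 5 1 = [1,2,3,4] := by decide
    have s6 : PySem.List.pyRange 1 6 1 = [1,2,3,4,5] := by decide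
    have s7 : PySem.List.pyRange 1 7 1 = [1,2,3,4,5,6] := by decide
    have s8 : PySem.List.pyRange 1 8 1 = [1,2,3,4,5,6,7] := by decide
    have s9 : PySem.List.pyRange 1 9 1 = [1,2,3,4,5,6,7,8] := by decide
    interval_cases d0 <;>
      simp [pvDpA, pvScanB, List.foldl, T, G, S, P1, P2, P3, P4, P5, P6, P7, P8, e2, e3, e4, e5, e6, e7, e8, e9, e10, s1, s2, s3, s4, s5, s6, s7, s8, s9]

-- ===== VERDICT (by name: the statement is the Claim_ definition above) =====
theorem count_dragon_blessed_spec : Claim_equal_count_dragon_blessed := by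
  intro X _ hpre
  exact pv_main X hpre
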